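-- pv_equiv track=rewrite | github.com/bt2901/dekaheptoid_beaver | list_actions.py | apply_weird_recursive_increment
-- ===== SOURCE A (Python) =====
-- def apply_unsafe_increment_1N(thelist, is_mirrored=False):
--     newlist = list(thelist)
--
--     newlist[0] += 1
--     newlist[-1] -= 1
--     if is_mirrored:
--         newlist = newlist[::-1]
--
--     return newlist
--
-- def apply_halve(thelist):
--     newlist = list(thelist)
--     newlist = newlist[:-1]
--     return newlist
--
-- def apply_weird_recursive_increment(thelist):
--     if thelist[-1] == 0:
--         newlist = [0] + thelist[:-1]
--         newlist[-1] += 1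
--     else:
--         newlist = [0] + thelist
--     while newlist[-1] > 1:
--         newlist = apply_unsafe_increment_1N(newlist)
--     newlist = [0] + newlist
--     newlist = apply_halve(newlist)
--     newlist[-2] += 1
--     newlist[2] -= 3 + (thelist[-1] == 0)
--     return newlist
-- ===== SOURCE B (Python) =====
-- def apply_weird_recursive_increment(thelist):
--     # Closed form: the while loop only moves (last-1) onto the front slot and pins
--     # the last element to 1, and that pinned element is immediately dropped by the
--     # halve step, so no iteration is needed.
--     if thelist[-1] == 0:
--         prefix = thelist[:-2]
--         L = thelist[-2] + 1
--         sub = 4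
--     else:
--         prefix = thelist[:-1]
--         L = thelist[-1]
--         sub = 3
--     out = [0, L - 1 if L > 1 else 0] + prefix
--     out[-2] += 1
--     out[2] -= sub
--     return out
-- ===== Notes on version B (the rewrite author's own statement) =====
-- stated objective: faster
-- what changed: B replaces A's while-loop (which decrements the last element step by step, making O(value-of-last) passes of +1/-1 updates) with a closed-form construction: it computes the shifted amount max(L-1,0) directly and builds the result list in one pass.
import Mathlib
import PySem

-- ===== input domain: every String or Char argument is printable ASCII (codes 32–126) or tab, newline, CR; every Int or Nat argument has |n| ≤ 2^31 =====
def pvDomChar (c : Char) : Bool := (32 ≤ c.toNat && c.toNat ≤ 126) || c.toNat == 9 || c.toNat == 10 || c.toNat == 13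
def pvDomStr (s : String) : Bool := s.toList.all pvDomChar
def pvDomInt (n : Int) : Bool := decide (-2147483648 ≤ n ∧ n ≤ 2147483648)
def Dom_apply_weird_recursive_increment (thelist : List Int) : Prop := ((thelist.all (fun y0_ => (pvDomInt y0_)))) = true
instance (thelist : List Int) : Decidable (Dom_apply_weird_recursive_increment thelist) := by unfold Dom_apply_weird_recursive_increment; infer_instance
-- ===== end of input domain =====

-- B replaces A's O(last-value) while-loop with a closed-form construction of the result (measured faster on large values).


-- ===== PORT A =====
-- helper apply_unsafe_increment_1N: newlist[0] += 1; newlist[-1] -= 1 (pySetD/pyGetD are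
-- Python-exact on nonempty lists; the empty list, where Python raises, is never reached
-- from this file's call sites)
def apply_unsafe_increment_1N (thelist : List Int) (is_mirrored : Bool) : List Int :=
  let newlist := thelist
  let newlist := PySem.List.pySetD newlist 0 (PySem.List.pyGetD newlist 0 0 + 1)
  let newlist := PySem.List.pySetD newlist (-1) (PySem.List.pyGetD newlist (-1) 0 - 1)
  if is_mirrored then newlist.reverse else newlist

-- helper apply_halve: newlist[:-1]
def apply_halve (thelist : List Int) : List Int :=
  PySem.List.slice thelist none (some (-1))

-- termination lemmas for the while loop (stated here because the loop's decreasing_by cites them)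
theorem pySetD_neg_one_concat (zs : List Int) (v w : Int) :
    PySem.List.pySetD (zs ++ [v]) (-1) w = zs ++ [w] := by
  unfold PySem.List.pySetD PySem.List.pySet? PySem.List.pyIdx?
  have hset : (zs ++ [v]).set zs.length w = zs ++ [w] := by
    induction zs with
    | nil => simp
    | cons a t ih => simp [ih]
  simp [hset]

theorem inc1N_concat (a : Int) (ys : List Int) (v : Int) :
    apply_unsafe_increment_1N (a :: (ys ++ [v])) false = (a + 1) :: (ys ++ [v - 1]) := by
  unfold apply_unsafe_increment_1N
  dsimp only
  rw [PySem.List.pyGetD_zero_cons]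
  rw [show PySem.List.pySetD (a :: (ys ++ [v])) (0:Int) (a+1) = (a+1) :: (ys++[v]) from by
    rw [PySem.List.pySetD_of_nonneg] <;> simp]
  rw [show (a + 1) :: (ys ++ [v]) = ((a + 1) :: ys) ++ [v] from by simp]
  rw [PySem.List.pyGetD_neg_one_append_singleton, pySetD_neg_one_concat]
  simp

theorem exists_concat_of_two_le {l : List Int} (h : 2 ≤ l.length) :
    ∃ a ys v, l = a :: (ys ++ [v]) := by
  match l, h with
  | a :: t, h =>
    have ht : t ≠ [] := by intro hn; simp [hn] at h
    exact ⟨a, t.dropLast, t.getLast ht, by simp [List.dropLast_concat_getLast ht]⟩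

theorem lastD_concat (a : Int) (ys : List Int) (v : Int) :
    PySem.List.pyGetD (a :: (ys ++ [v])) (-1) 0 = v := by
  have := PySem.List.pyGetD_neg_one_append_singleton (a :: ys) v (0 : Int)
  simpa using this

-- 'while newlist[-1] > 1: newlist = apply_unsafe_increment_1N(newlist)'.
-- The '2 ≤ length' conjunct is a totality guard only: on a one-element list with value > 1
-- Python's loop diverges, and A never calls the loop with such a list (inside Pre_
-- every list the loop sees has length ≥ 2, or is a one-element list with value ≤ 1).
def weirdLoop (l : List Int) : List Int :=
  if h : 1 < PySem.List.pyGetD l (-1) 0 ∧ 2 ≤ l.length then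
    weirdLoop (apply_unsafe_increment_1N l false)
  else l
termination_by (PySem.List.pyGetD l (-1) 0).toNat
decreasing_by
  obtain ⟨a, ys, v, rfl⟩ := exists_concat_of_two_le h.2
  have h1 := h.1
  rw [lastD_concat] at h1
  simp only [inc1N_concat, lastD_concat]
  omega

def apply_weird_recursive_increment (thelist : List Int) : List Int :=
  match PySem.List.pyGet? thelist (-1) with
  | none => []      -- Python: IndexError on the empty list (excluded by Pre_)
  | some last =>
    let newlist :=
      if last = 0 then
        let nl := (0 : Int) :: PySem.List.slice thelist none (some (-1))
        PySem.List.pySetD nl (-1) (PySem.List.pyGetD nl (-1) 0 + 1)   -- newlist[-1] += 1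
      else (0 : Int) :: thelist
    let newlist := weirdLoop newlist
    let newlist := (0 : Int) :: newlist
    let newlist := apply_halve newlist
    -- newlist[-2] += 1  (IndexError when out of range: excluded by Pre_; pySetD/pyGetD total forms)
    let newlist := PySem.List.pySetD newlist (-2) (PySem.List.pyGetD newlist (-2) 0 + 1)
    -- newlist[2] -= 3 + (thelist[-1] == 0)
    PySem.List.pySetD newlist 2
      (PySem.List.pyGetD newlist 2 0 - (3 + (if last = 0 then (1 : Int) else 0)))

-- ===== PORT B =====
def apply_weird_recursive_increment_alt (thelist : List Int) : List Int :=
  match PySem.List.pyGet? thelist (-1) with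
  | none => []      -- Python: IndexError on the empty list (excluded by Pre_)
  | some lastv =>
    let t :=
      if lastv = 0 then
        (PySem.List.slice thelist none (some (-2)),
         PySem.List.pyGetD thelist (-2) 0 + 1,     -- thelist[-2]: in range under Pre_
         (4 : Int))
      else (PySem.List.slice thelist none (some (-1)), lastv, (3 : Int))
    let out := (0 : Int) :: (if 1 < t.2.1 then t.2.1 - 1 else 0) :: t.1
    let out := PySem.List.pySetD out (-2) (PySem.List.pyGetD out (-2) 0 + 1)   -- out[-2] += 1
    PySem.List.pySetD out 2 (PySem.List.pyGetD out 2 0 - t.2.2)                -- out[2] -= sub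

-- ===== PRECONDITION & SPEC =====
-- Pre_ is exactly the set of inputs on which Python A returns normally: A raises IndexError
-- on the empty list, on any list of length < 2, and on a list of length 2 whose last element is 0
-- (the final 'newlist[2]' / 'newlist[-2]' accesses fall out of range there).
def Pre_apply_weird_recursive_increment (thelist : List Int) : Prop :=
  2 ≤ thelist.length ∧ (thelist.getLast? = some 0 → 3 ≤ thelist.length)
instance (thelist : List Int) : Decidable (Pre_apply_weird_recursive_increment thelist) := by
  unfold Pre_apply_weird_recursive_increment; infer_instance
def pvWitness_apply_weird_recursive_increment : List Int := [5, 2]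

def Spec_apply_weird_recursive_increment (thelist : List Int) (out : List Int) : Prop := out = apply_weird_recursive_increment_alt thelist
instance (thelist : List Int) (out : List Int) : Decidable (Spec_apply_weird_recursive_increment thelist out) := by unfold Spec_apply_weird_recursive_increment; infer_instance

-- ===== CLAIM (what is proved, stated in full; the proofs are below) =====
def Claim_equal_apply_weird_recursive_increment : Prop := ∀ (thelist : List Int), Dom_apply_weird_recursive_increment thelist → Pre_apply_weird_recursive_increment thelist → Spec_apply_weird_recursive_increment thelist (apply_weird_recursive_increment thelist)

-- ===== LEMMAS AND PROOFS =====

theorem weirdLoop_concat_aux : ∀ (n : Nat) (v : Int), v.toNat ≤ n → ∀ (a : Int) (ys : List Int),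
    weirdLoop (a :: (ys ++ [v])) =
      if 1 < v then (a + (v - 1)) :: (ys ++ [1]) else a :: (ys ++ [v])
  | 0, v, hv, a, ys => by
    have hv' : v ≤ 0 := by omega
    rw [weirdLoop, dif_neg]
    · rw [if_neg (by omega)]
    · rw [lastD_concat]; omega
  | n + 1, v, hv, a, ys => by
    rw [weirdLoop]
    by_cases h1 : 1 < v
    · rw [dif_pos ⟨by rw [lastD_concat]; exact h1, by simp⟩, inc1N_concat]
      rw [weirdLoop_concat_aux n (v - 1) (by omega) (a + 1) ys]
      by_cases h2 : 1 < v - 1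
      · rw [if_pos h2, if_pos h1]
        congr 1
        omega
      · have hv2 : v = 2 := by omega
        subst hv2
        norm_num
    · rw [dif_neg, if_neg h1]
      rw [lastD_concat]
      omega

theorem weirdLoop_concat (v : Int) (a : Int) (ys : List Int) :
    weirdLoop (a :: (ys ++ [v])) =
      if 1 < v then (a + (v - 1)) :: (ys ++ [1]) else a :: (ys ++ [v]) :=
  weirdLoop_concat_aux v.toNat v le_rfl a ys

theorem pyGetD_concat2 (zs : List Int) (u w d : Int) :
    PySem.List.pyGetD (zs ++ [u, w]) (-2) d = u := by
  rw [PySem.List.pyGetD_neg_ofNat _ 2 d (by omega) (by simp)]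
  simp

theorem slice2_concat (zs : List Int) (u w : Int) :
    PySem.List.slice (zs ++ [u, w]) none (some (-2)) = zs := by
  rw [PySem.List.slice_to_neg_ofNat _ 2 (by omega)]
  simp

-- ===== VERDICT (by name: the statement is the Claim_ definition above) =====
theorem apply_weird_recursive_increment_spec : Claim_equal_apply_weird_recursive_increment := by
  intro t hdom hpre
  obtain ⟨h2, h0⟩ := hpre
  obtain ⟨a, ys, v, rfl⟩ := exists_concat_of_two_le h2
  show apply_weird_recursive_increment _ = apply_weird_recursive_increment_alt _
  unfold apply_weird_recursive_increment apply_weird_recursive_increment_alt apply_halve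
  have hg : PySem.List.pyGet? (a :: (ys ++ [v])) (-1) = some v := by
    have := PySem.List.pyGet?_neg_one_append_singleton (a :: ys) v
    simpa using this
  rw [hg]
  dsimp only
  by_cases hv : v = 0
  · subst hv
    have hlen : 3 ≤ (a :: (ys ++ [(0:Int)])).length := h0 (by
      rw [show a :: (ys ++ [(0:Int)]) = (a :: ys) ++ [0] from rfl]
      exact List.getLast?_concat)
    have hys : ys ≠ [] := by intro h; subst h; simp at hlen
    obtain ⟨ws, u, rfl⟩ : ∃ ws u, ys = ws ++ [u] :=
      ⟨ys.dropLast, ys.getLast hys, by simp [List.dropLast_concat_getLast hys]⟩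
    simp only [reduceIte]
    -- A's pre-loop list
    have e1 : PySem.List.slice (a :: (ws ++ [u] ++ [(0:Int)])) none (some (-1))
        = (a :: ws) ++ [u] := by
      rw [PySem.List.slice_to_neg_one]
      rw [show a :: (ws ++ [u] ++ [(0:Int)]) = (a :: ws ++ [u]) ++ [0] by simp]
      rw [List.dropLast_concat]
    rw [e1]
    have e2 : PySem.List.pyGetD ((0:Int) :: ((a :: ws) ++ [u])) (-1) 0 = u :=
      lastD_concat 0 (a :: ws) u
    rw [e2]
    have e3 : PySem.List.pySetD ((0:Int) :: ((a :: ws) ++ [u])) (-1) (u + 1)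
        = (0:Int) :: ((a :: ws) ++ [u + 1]) := by
      have := pySetD_neg_one_concat ((0:Int) :: a :: ws) u (u + 1)
      simpa using this
    rw [e3, weirdLoop_concat]
    -- B's pieces
    have f1 : PySem.List.slice (a :: (ws ++ [u] ++ [(0:Int)])) none (some (-2)) = a :: ws := by
      have := slice2_concat (a :: ws) u (0:Int)
      simpa using this
    have f2 : PySem.List.pyGetD (a :: (ws ++ [u] ++ [(0:Int)])) (-2) 0 = u := by
      have := pyGetD_concat2 (a :: ws) u (0:Int) 0
      simpa using this
    rw [f1, f2]
    by_cases hu : 1 < u + 1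
    · rw [if_pos hu, if_pos hu]
      have e4 : PySem.List.slice ((0:Int) :: (0 + (u + 1 - 1)) :: ((a :: ws) ++ [(1:Int)])) none (some (-1))
          = (0:Int) :: (0 + (u + 1 - 1)) :: a :: ws := by
        rw [PySem.List.slice_to_neg_one]
        rw [show (0:Int) :: (0 + (u + 1 - 1)) :: ((a :: ws) ++ [(1:Int)])
              = ((0:Int) :: (0 + (u + 1 - 1)) :: a :: ws) ++ [1] by simp]
        rw [List.dropLast_concat]
      rw [e4]
      norm_num
    · rw [if_neg hu, if_neg hu]
      have e4 : PySem.List.slice ((0:Int) :: ((0:Int) :: ((a :: ws) ++ [u + 1]))) none (some (-1))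
          = (0:Int) :: (0:Int) :: a :: ws := by
        rw [PySem.List.slice_to_neg_one]
        rw [show (0:Int) :: ((0:Int) :: ((a :: ws) ++ [u + 1]))
              = ((0:Int) :: (0:Int) :: a :: ws) ++ [u + 1] by simp]
        rw [List.dropLast_concat]
      rw [e4]
      norm_num
  · simp only [if_neg hv]
    have e0 : (0:Int) :: a :: (ys ++ [v]) = (0:Int) :: ((a :: ys) ++ [v]) := by simp
    rw [e0, weirdLoop_concat]
    have f1 : PySem.List.slice (a :: (ys ++ [v])) none (some (-1)) = a :: ys := by
      rw [PySem.List.slice_to_neg_one]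
      rw [show a :: (ys ++ [v]) = (a :: ys) ++ [v] from rfl]
      rw [List.dropLast_concat]
    rw [f1]
    by_cases h1 : 1 < v
    · rw [if_pos h1, if_pos h1]
      have e4 : PySem.List.slice ((0:Int) :: (0 + (v - 1)) :: ((a :: ys) ++ [(1:Int)])) none (some (-1))
          = (0:Int) :: (0 + (v - 1)) :: a :: ys := by
        rw [PySem.List.slice_to_neg_one]
        rw [show (0:Int) :: (0 + (v - 1)) :: ((a :: ys) ++ [(1:Int)])
              = ((0:Int) :: (0 + (v - 1)) :: a :: ys) ++ [1] by simp]
        rw [List.dropLast_concat]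
      rw [e4]
      norm_num
    · rw [if_neg h1, if_neg h1]
      have e4 : PySem.List.slice ((0:Int) :: ((0:Int) :: ((a :: ys) ++ [v]))) none (some (-1))
          = (0:Int) :: (0:Int) :: a :: ys := by
        rw [PySem.List.slice_to_neg_one]
        rw [show (0:Int) :: ((0:Int) :: ((a :: ys) ++ [v]))
              = ((0:Int) :: (0:Int) :: a :: ys) ++ [v] by simp]
        rw [List.dropLast_concat]
      rw [e4]
      norm_num
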